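-- pv_equiv track=rewrite | github.com/orensulti/ex7 | ex7.py | sequences_with_prefix_no_repetition
-- ===== SOURCE A (Python) =====
-- def sequences_with_prefix_no_repetition(prefix, char_list, new_list, n):
--     """
--     :param prefix:
--     :param char_list:
--     :param new_list:
--     :param n:
--     :return: list with sequences of n characters after a prefix, without
--     repetition of characters
--     """
--     if n == 0:
--         # if n == 0 append to list only prefix and return the list
--         new_list.append(prefix)
--         return new_list
--     for char in char_list:
--         # recursive call: assuming there is a solution for prefix and n-1
--         # characters after the prefix. all we have to do is to add for each
--         # solution a char from char_list, only if the char is not in prefix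
--         if char not in prefix:
--             sequences_with_prefix_no_repetition(prefix + char, char_list, new_list, n-1)
--     return new_list
-- ===== SOURCE B (Python) =====
-- def sequences_with_prefix_no_repetition(prefix, char_list, new_list, n):
--     # Breadth-first, level by level: expand every partial sequence by every
--     # eligible char, up to n times (stopping early once the level is empty),
--     # then extend new_list with the finished level.
--     level = [prefix]
--     k = n
--     while k > 0 and level:
--         level = [p + c for p in level for c in char_list if c not in p]
--         k -= 1
--     new_list.extend(level)
--     return new_list
-- ===== Notes on version B (the rewrite author's own statement) =====
-- stated objective: alternative
-- what changed: Replaces the recursive DFS with a breadth-first level-by-level expansion: a list of partial sequences is expanded by every eligible char up to n times (stopping once the level empties), then appended to new_list; no recursion and no per-node appends.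
-- outside the precondition, e.g. on sequences_with_prefix_no_repetition('x', ['a'], [], -1): A returns [], B returns ['x']
import Mathlib
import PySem

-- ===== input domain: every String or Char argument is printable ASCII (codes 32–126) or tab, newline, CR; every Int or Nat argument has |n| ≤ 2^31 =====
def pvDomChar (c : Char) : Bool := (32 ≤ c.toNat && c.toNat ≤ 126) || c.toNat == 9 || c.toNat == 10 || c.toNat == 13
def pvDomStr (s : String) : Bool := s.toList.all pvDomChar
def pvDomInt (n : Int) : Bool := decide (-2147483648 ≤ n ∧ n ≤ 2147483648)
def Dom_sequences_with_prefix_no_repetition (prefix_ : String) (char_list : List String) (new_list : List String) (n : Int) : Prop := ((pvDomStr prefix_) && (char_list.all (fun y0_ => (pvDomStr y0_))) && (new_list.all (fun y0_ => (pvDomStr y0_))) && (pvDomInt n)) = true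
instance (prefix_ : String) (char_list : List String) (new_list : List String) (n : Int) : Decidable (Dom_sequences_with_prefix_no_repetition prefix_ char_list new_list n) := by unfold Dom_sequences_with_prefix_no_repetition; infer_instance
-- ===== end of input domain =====

-- ===== PORT A =====
-- B changes: recursive DFS replaced by breadth-first level-by-level expansion (flatMap n times);
-- objective: alternative. Both Pythons mutate new_list in place; the claim is about the returned
-- list (which is that same list).
-- A is total: each recursive call appends the chosen char to the prefix, so the number of
-- chars still eligible (`char not in prefix`) strictly decreases; pvElig/pvElig_lt prove
-- exactly that and are cited by the port's termination proof.

def pvElig (cl : List String) (pfx : String) : Nat :=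
  (cl.filter (fun c => !(PySem.Str.isIn c pfx))).length

lemma pvIsIn_mono (c pfx t : String) (h : PySem.Str.isIn c pfx = true) :
    PySem.Str.isIn c (pfx ++ t) = true := by
  rw [PySem.Str.isIn_iff_infix] at *
  simp only [String.toList_append]
  exact h.trans ⟨[], t.toList, by simp⟩

lemma pvIsIn_self (pfx c : String) : PySem.Str.isIn c (pfx ++ c) = true := by
  rw [PySem.Str.isIn_iff_infix]
  simp only [String.toList_append]
  exact ((List.suffix_append _ _) : c.toList <:+ pfx.toList ++ c.toList).isInfix

lemma pvElig_lt (cl : List String) (pfx c : String) (hmem : c ∈ cl)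
    (hc : PySem.Str.isIn c pfx = false) : pvElig cl (pfx ++ c) < pvElig cl pfx := by
  unfold pvElig
  have hsub : List.Sublist (cl.filter (fun x => !(PySem.Str.isIn x (pfx ++ c))))
      (cl.filter (fun x => !(PySem.Str.isIn x pfx))) := by
    apply List.monotone_filter_right
    intro a ha
    simp only [Bool.not_eq_eq_eq_not, Bool.not_true] at ha ⊢
    by_contra hb
    have hb' : PySem.Str.isIn a pfx = true := by
      cases h : PySem.Str.isIn a pfx with
      | true => rfl
      | false => exact absurd h hb
    rw [pvIsIn_mono a pfx c hb'] at ha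
    exact Bool.noConfusion ha
  have hle := hsub.length_le
  rcases Nat.lt_or_ge (cl.filter (fun x => !(PySem.Str.isIn x (pfx ++ c)))).length
      (cl.filter (fun x => !(PySem.Str.isIn x pfx))).length with h | h
  · exact h
  · exfalso
    have heq : cl.filter (fun x => !(PySem.Str.isIn x (pfx ++ c))) =
        cl.filter (fun x => !(PySem.Str.isIn x pfx)) := hsub.eq_of_length (by omega)
    have hcmem : c ∈ cl.filter (fun x => !(PySem.Str.isIn x pfx)) := by
      rw [List.mem_filter]
      exact ⟨hmem, by rw [hc]; rfl⟩
    rw [← heq] at hcmem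
    have := pvIsIn_self pfx c
    simp only [List.mem_filter, Bool.not_eq_eq_eq_not, Bool.not_true] at hcmem
    rw [this] at hcmem
    simpa using hcmem.2

def seqAgo (cl : List String) (pfx : String) (nl : List String) (n : Int) : List String :=
  if n = 0 then nl ++ [pfx]
  else
    cl.attach.foldl
      (fun acc c =>
        if h : PySem.Str.isIn c.1 pfx then acc else seqAgo cl (pfx ++ c.1) acc (n - 1))
      nl
termination_by pvElig cl pfx
decreasing_by exact pvElig_lt cl pfx c.1 c.2 (by simpa using h)

def sequences_with_prefix_no_repetition (prefix_ : String) (char_list : List String) (new_list : List String) (n : Int) : List String :=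
  seqAgo char_list prefix_ new_list n

-- ===== PORT B =====
-- 'while k > 0 and level: level = [p + c for p in level for c in char_list if c not in p]'.
def seqBlevel (cl : List String) (level : List String) (k : Nat) : List String :=
  match k with
  | 0 => level
  | Nat.succ k =>
      if level = [] then level
      else
        seqBlevel cl
          (level.flatMap (fun p =>
            (cl.filter (fun c => !(PySem.Str.isIn c p))).map (fun c => p ++ c))) k

def sequences_with_prefix_no_repetition_alt (prefix_ : String) (char_list : List String) (new_list : List String) (n : Int) : List String :=
  new_list ++ seqBlevel char_list [prefix_] n.toNat

-- ===== PRECONDITION & SPEC =====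
-- Pre_ restricts to the natural domain n ≥ 0 (n counts characters to append): for a
-- negative count A returns new_list unchanged while B naturally treats it like 0;
-- neither behaviour is specified, so negative n is excluded.
def Pre_sequences_with_prefix_no_repetition (prefix_ : String) (char_list : List String) (new_list : List String) (n : Int) : Prop := 0 ≤ n
instance (prefix_ : String) (char_list : List String) (new_list : List String) (n : Int) : Decidable (Pre_sequences_with_prefix_no_repetition prefix_ char_list new_list n) := by unfold Pre_sequences_with_prefix_no_repetition; infer_instance
def pvWitness_sequences_with_prefix_no_repetition : String × List String × List String × Int := ("x", ["a", "b"], ["q"], 2)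

def Spec_sequences_with_prefix_no_repetition (prefix_ : String) (char_list : List String) (new_list : List String) (n : Int) (out : List String) : Prop := out = sequences_with_prefix_no_repetition_alt prefix_ char_list new_list n
instance (prefix_ : String) (char_list : List String) (new_list : List String) (n : Int) (out : List String) : Decidable (Spec_sequences_with_prefix_no_repetition prefix_ char_list new_list n out) := by unfold Spec_sequences_with_prefix_no_repetition; infer_instance

-- ===== CLAIM (what is proved, stated in full; the proofs are below) =====
def Claim_equal_sequences_with_prefix_no_repetition : Prop := ∀ (prefix_ : String) (char_list : List String) (new_list : List String) (n : Int), Dom_sequences_with_prefix_no_repetition prefix_ char_list new_list n → Pre_sequences_with_prefix_no_repetition prefix_ char_list new_list n → Spec_sequences_with_prefix_no_repetition prefix_ char_list new_list n (sequences_with_prefix_no_repetition prefix_ char_list new_list n)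

-- ===== LEMMAS AND PROOFS =====

-- one level of B's expansion on a single partial sequence
lemma seqBlevel_singleton_succ (cl : List String) (p : String) (k : Nat) :
    seqBlevel cl [p] (k + 1)
      = seqBlevel cl ((cl.filter (fun c => !(PySem.Str.isIn c p))).map (fun c => p ++ c)) k := by
  rw [seqBlevel]
  simp

-- B's level expansion distributes over the elements of the level
lemma seqBlevel_flat (cl : List String) :
    ∀ (k : Nat) (level : List String),
      seqBlevel cl level k = level.flatMap (fun p => seqBlevel cl [p] k) := by
  intro k
  induction k with
  | zero => intro level; simp [seqBlevel]
  | succ k ih =>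
      intro level
      by_cases hlev : level = []
      · subst hlev; simp [seqBlevel]
      · rw [seqBlevel]
        simp only [hlev, if_false]
        rw [ih, List.flatMap_assoc]
        congr 1
        funext p
        rw [← ih, ← seqBlevel_singleton_succ]

-- the correspondence: A's DFS appends exactly B's n-th level, in the same order
lemma seqA_eq_level (cl : List String) :
    ∀ (E : Nat) (pfx : String), pvElig cl pfx < E →
      ∀ (k : Nat) (nl : List String),
        seqAgo cl pfx nl (k : Int) = nl ++ seqBlevel cl [pfx] k := by
  intro E
  induction E with
  | zero => intro pfx h; omega
  | succ E ihE =>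
      intro pfx hE k nl
      cases k with
      | zero => rw [seqAgo]; simp [seqBlevel]
      | succ k =>
          rw [seqAgo]
          have hk : ((k + 1 : Nat) : Int) ≠ 0 := by omega
          simp only [hk, if_false, dite_eq_ite]
          have hA : cl.attach.foldl
              (fun acc c => if PySem.Str.isIn c.1 pfx then acc
                else seqAgo cl (pfx ++ c.1) acc (((k + 1 : Nat) : Int) - 1)) nl
              = (cl.filter (fun c => !(PySem.Str.isIn c pfx))).foldl
                  (fun a c => seqAgo cl (pfx ++ c) a (((k + 1 : Nat) : Int) - 1)) nl := by
            rw [List.foldl_attach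
              (f := fun a x => if PySem.Str.isIn x pfx then a
                else seqAgo cl (pfx ++ x) a (((k + 1 : Nat) : Int) - 1)),
              List.foldl_filter]
            congr 1
            funext a c
            cases PySem.Str.isIn c pfx <;> simp
          rw [hA]
          have hrw : ∀ c ∈ cl.filter (fun c => !(PySem.Str.isIn c pfx)), ∀ (a : List String),
              seqAgo cl (pfx ++ c) a (((k + 1 : Nat) : Int) - 1)
                = a ++ seqBlevel cl [pfx ++ c] k := by
            intro c hc a
            rw [List.mem_filter] at hc
            have hlt := pvElig_lt cl pfx c hc.1 (by simpa using hc.2)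
            have : (((k + 1 : Nat) : Int) - 1) = (k : Int) := by push_cast; ring
            rw [this, ihE (pfx ++ c) (by omega) k a]
          calc (cl.filter (fun c => !(PySem.Str.isIn c pfx))).foldl
                (fun a c => seqAgo cl (pfx ++ c) a (((k + 1 : Nat) : Int) - 1)) nl
              = (cl.filter (fun c => !(PySem.Str.isIn c pfx))).foldl
                (fun a c => a ++ seqBlevel cl [pfx ++ c] k) nl := by
                  apply PySem.List.foldl_congr_mem'
                  exact hrw
            _ = nl ++ (cl.filter (fun c => !(PySem.Str.isIn c pfx))).flatMap
                  (fun c => seqBlevel cl [pfx ++ c] k) :=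
                  PySem.List.foldl_append_eq_flatMap _ _ _
            _ = nl ++ seqBlevel cl [pfx] (k + 1) := by
                  rw [seqBlevel_singleton_succ, seqBlevel_flat, List.flatMap_map]

-- ===== VERDICT (by name: the statement is the Claim_ definition above) =====
theorem sequences_with_prefix_no_repetition_spec : Claim_equal_sequences_with_prefix_no_repetition := by
  intro prefix_ char_list new_list n _ hn
  show _ = _
  have hcast : ((n.toNat : Nat) : Int) = n := Int.toNat_of_nonneg hn
  rw [sequences_with_prefix_no_repetition, sequences_with_prefix_no_repetition_alt]
  conv_lhs => rw [← hcast]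
  rw [seqA_eq_level char_list (pvElig char_list prefix_ + 1) prefix_ (by omega)]
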